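-- pv_equiv track=rewrite | github.com/firaolgelana/Leetcode-Solutions | 3567-minimum-absolute-difference-in-sliding-submatrix/3567-minimum-absolute-difference-in-sliding-submatrix.py | minAbsDiff
-- ===== SOURCE A (Python) =====
-- from typing import List
--
-- def minAbsDiff(grid: List[List[int]], k: int) -> List[List[int]]:
--     n, m = len(grid), len(grid[0])
--     ans = []
--     for i in range(n - k + 1):
--         curr = []
--         for j in range(m - k + 1):
--             seen = set()
--             for x in range(i, i + k):
--                 for y in range(j, j + k):
--                     seen.add(grid[x][y])
--             arr = sorted(seen)
--             min_val = float('inf')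
--             if len(arr) == 1:
--                 curr.append(0)
--             for a in range(1, len(arr)):
--                 min_val = min(min_val, arr[a] - arr[a - 1])
--             if min_val != float('inf'):
--                 curr.append(min_val)
--         if curr:
--             ans.append(curr[:])
--
--     return ans
-- ===== SOURCE B (Python) =====
-- from typing import List
--
--
-- def _pair_min(cells):
--     # minimum positive pairwise difference, None if no two unequal values
--     best = None
--     tail = cells
--     while tail:
--         a, tail = tail[0], tail[1:]
--         for b in tail:
--             d = a - b if a > b else b - a
--             if d != 0 and (best is None or d < best):
--                 best = d
--     return best
--
--
-- def minAbsDiff(grid: List[List[int]], k: int) -> List[List[int]]: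
--     n, m = len(grid), len(grid[0])
--     if k < 1:
--         return []
--     ans = []
--     for i in range(n - k + 1):
--         row = []
--         for j in range(m - k + 1):
--             cells = [v for r in grid[i:i + k] for v in r[j:j + k]]
--             best = _pair_min(cells)
--             row.append(best if best is not None else 0)
--         if row:
--             ans.append(row)
--     return ans
-- ===== Notes on version B (the rewrite author's own statement) =====
-- stated objective: alternative
-- what changed: B abandons A's set-dedup/sort/adjacent-gap pipeline entirely: per window it never sorts and never builds a set, computing the answer as the minimum |a-b| over all unequal pairs of raw cells by a head/tail pairwise scan (correct because the min adjacent gap of the sorted distinct values equals the min positive pairwise difference), with 0 when all cells are equal; trades the sort for a comparison-only pairwise pass that is O(k^4) per window.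
import Mathlib
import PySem

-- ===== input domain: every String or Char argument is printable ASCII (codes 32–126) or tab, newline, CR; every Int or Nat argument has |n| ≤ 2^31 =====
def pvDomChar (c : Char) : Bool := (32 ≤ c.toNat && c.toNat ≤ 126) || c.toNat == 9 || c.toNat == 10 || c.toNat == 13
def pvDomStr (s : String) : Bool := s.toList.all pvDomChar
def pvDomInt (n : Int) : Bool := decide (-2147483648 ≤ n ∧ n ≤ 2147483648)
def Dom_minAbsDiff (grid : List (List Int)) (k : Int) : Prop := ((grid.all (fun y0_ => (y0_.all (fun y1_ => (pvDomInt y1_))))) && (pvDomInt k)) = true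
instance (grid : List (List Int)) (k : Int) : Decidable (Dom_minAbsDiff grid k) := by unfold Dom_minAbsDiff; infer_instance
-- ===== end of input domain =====

-- B avoids A's set-dedup/sort/adjacent-gap pipeline: it takes the minimum |a-b| over all
-- unequal pairs of raw window cells in a head/tail pairwise scan (objective: alternative).

-- ===== PORT A =====
def minAbsDiff (grid : List (List Int)) (k : Int) : List (List Int) :=
  let n : Int := grid.length
  let m : Int := grid.headI.length
  (PySem.List.pyRange 0 (n - k + 1)).foldl (fun ans i =>
    let curr : List Int :=
      (PySem.List.pyRange 0 (m - k + 1)).foldl (fun (curr : List Int) (j : Int) =>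
        let seen : PySem.Set Int :=
          (PySem.List.pyRange i (i + k)).foldl (fun s x =>
            (PySem.List.pyRange j (j + k)).foldl (fun s y =>
              PySem.Set.add s (PySem.List.pyGetD (PySem.List.pyGetD grid x []) y 0)) s)
            PySem.Set.empty
        let arr := PySem.List.sorted seen (fun v => v)
        let curr := if arr.length == 1 then curr ++ [0] else curr
        let minVal : Option Int :=
          (PySem.List.pyRange 1 (arr.length : Int)).foldl (fun mv a =>
            some (match mv with
              | none => PySem.List.pyGetD arr a 0 - PySem.List.pyGetD arr (a - 1) 0
              | some v => min v (PySem.List.pyGetD arr a 0 - PySem.List.pyGetD arr (a - 1) 0))) none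
        match minVal with
        | some v => curr ++ [v]
        | none => curr) []
    if curr ≠ [] then ans ++ [curr] else ans) []

-- ===== PORT B =====
-- _pair_min: while-loop over the tail, inner for-loop; the match realises Python's
-- 'if d != 0 and (best is None or d < best): best = d' branch structure exactly.
def pvPairMin : List Int → Option Int → Option Int
  | [], best => best
  | a :: tail, best =>
      pvPairMin tail (tail.foldl (fun best b =>
        let d := if a > b then a - b else b - a
        if d = 0 then best
        else match best with
          | none => some d
          | some v => if d < v then some d else best) best)

def minAbsDiff_alt (grid : List (List Int)) (k : Int) : List (List Int) :=
  let n : Int := grid.length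
  let m : Int := grid.headI.length
  if k < 1 then []
  else
    (PySem.List.pyRange 0 (n - k + 1)).foldl (fun ans i =>
      let row : List Int :=
        (PySem.List.pyRange 0 (m - k + 1)).foldl (fun (row : List Int) (j : Int) =>
          let cells := (PySem.List.slice grid (some i) (some (i + k))).flatMap
              (fun r => PySem.List.slice r (some j) (some (j + k)))
          let best := pvPairMin cells none
          row ++ [match best with | some v => v | none => 0]) []
      if row ≠ [] then ans ++ [row] else ans) []

-- ===== PRECONDITION & SPEC =====
-- Pre_ excludes exactly the inputs where A raises an IndexError: the empty grid (grid[0]),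
-- and ragged grids whose windows make A index a row shorter than the first row.
def Pre_minAbsDiff (grid : List (List Int)) (k : Int) : Prop :=
  grid ≠ [] ∧ ((1 ≤ k ∧ k ≤ (grid.length : Int) ∧ k ≤ (grid.headI.length : Int)) →
    ∀ r ∈ grid, grid.headI.length ≤ r.length)
instance (grid : List (List Int)) (k : Int) : Decidable (Pre_minAbsDiff grid k) := by
  unfold Pre_minAbsDiff; infer_instance

def pvWitness_minAbsDiff : List (List Int) × Int := ([[1, 2], [3, 4]], 2)

def Spec_minAbsDiff (grid : List (List Int)) (k : Int) (out : List (List Int)) : Prop := out = minAbsDiff_alt grid k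
instance (grid : List (List Int)) (k : Int) (out : List (List Int)) : Decidable (Spec_minAbsDiff grid k out) := by unfold Spec_minAbsDiff; infer_instance

-- ===== CLAIM (what is proved, stated in full; the proofs are below) =====
def Claim_equal_minAbsDiff : Prop := ∀ (grid : List (List Int)) (k : Int), Dom_minAbsDiff grid k → Pre_minAbsDiff grid k → Spec_minAbsDiff grid k (minAbsDiff grid k)

-- ===== LEMMAS AND PROOFS =====

-- step of A's running minimum over an Option accumulator
def pvAStep (mv : Option Int) (g : Int) : Option Int :=
  some (match mv with | none => g | some v => min v g)
-- running Option-minimum of a list of candidates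
def pvMinO (o : Option Int) (l : List Int) : Option Int := l.foldl pvAStep o
-- adjacent pairs of a list
def pvPairs (l : List Int) : List (Int × Int) := l.zip l.tail
-- the positive difference |a - b| as B computes it
def pvPosD (a b : Int) : Int := if a > b then a - b else b - a
-- the multiset of B's candidate differences: |a-b| over all unequal (position-) pairs
def pvCands : List Int → List Int
  | [] => []
  | a :: t => (t.filter (fun b => pvPosD a b != 0)).map (fun b => pvPosD a b) ++ pvCands t
-- ordered dedup of a sorted list (what sorted(set(xs)) is, element-wise)
def pvDD : List Int → List Int
  | [] => []
  | [a] => [a]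
  | a :: b :: t => if a = b then pvDD (b :: t) else a :: pvDD (b :: t)

theorem pvDD_cons_head (a : Int) (t : List Int) : ∃ u, pvDD (a :: t) = a :: u := by
  match t with
  | [] => exact ⟨[], rfl⟩
  | b :: t' =>
    obtain ⟨u, hu⟩ := pvDD_cons_head b t'
    by_cases h : a = b
    · subst h; exact ⟨u, by simp [pvDD, hu]⟩
    · exact ⟨pvDD (b :: t'), by simp [pvDD, h]⟩

theorem pvPairs_cons_cons (a b : Int) (t : List Int) :
    pvPairs (a :: b :: t) = (a, b) :: pvPairs (b :: t) := by
  simp [pvPairs]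

theorem pvPairs_append (l : List Int) (x : Int) (h : l ≠ []) :
    pvPairs (l ++ [x]) = pvPairs l ++ [(l.getLast h, x)] := by
  induction l with
  | nil => simp at h
  | cons a t ih =>
    cases t with
    | nil => simp [pvPairs]
    | cons b t' =>
      have := ih (by simp)
      simp only [List.cons_append, pvPairs_cons_cons]
      rw [show b :: (t' ++ [x]) = (b :: t') ++ [x] by simp, this]
      simp [List.getLast_cons]

theorem pvPairs_eq_nil_iff (l : List Int) : pvPairs l = [] ↔ l.length ≤ 1 := by
  cases l with
  | nil => simp [pvPairs]
  | cons a t =>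
    cases t with
    | nil => simp [pvPairs]
    | cons b t' => simp [pvPairs_cons_cons]

theorem mem_pvDD (l : List Int) (x : Int) : x ∈ pvDD l ↔ x ∈ l := by
  induction l using pvDD.induct with
  | case1 => simp [pvDD]
  | case2 a => simp [pvDD]
  | case3 b t ih => simp [pvDD, ih]
  | case4 a b t h ih => simp [pvDD, h, ih]

theorem pvDD_pairwise_lt (l : List Int) (h : l.Pairwise (· ≤ ·)) :
    (pvDD l).Pairwise (· < ·) := by
  induction l using pvDD.induct with
  | case1 => simp [pvDD]
  | case2 a => simp [pvDD]
  | case3 b t ih =>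
    rw [show pvDD (b :: b :: t) = pvDD (b :: t) by simp [pvDD]]
    exact ih (h.sublist (List.sublist_cons_self _ _))
  | case4 a b t hne ih =>
    have h' := h.sublist (List.sublist_cons_self a (b :: t))
    simp only [pvDD, if_neg hne]
    refine List.Pairwise.cons ?_ (ih h')
    intro y hy
    have hyin : y ∈ b :: t := (mem_pvDD _ _).mp hy
    have hab : a ≤ b := (List.pairwise_cons.mp h).1 b (by simp)
    rcases List.mem_cons.mp hyin with rfl | hyt
    · omega
    · have : b ≤ y := (List.pairwise_cons.mp h').1 y hyt
      omega

theorem pv_arr_eq (xs : List Int) :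
    PySem.List.sorted (PySem.Set.ofList xs) (fun v => v)
      = pvDD (PySem.List.sorted xs (fun v => v)) := by
  have h1 : (PySem.List.sorted (PySem.Set.ofList xs) (fun v => v)).Pairwise (· < ·) :=
    PySem.List.sorted_ofList_pairwise_lt xs
  have h2 : (pvDD (PySem.List.sorted xs (fun v => v))).Pairwise (· < ·) :=
    pvDD_pairwise_lt _ (PySem.List.sorted_pairwise xs (fun v => v))
  have hmem : ∀ y, y ∈ PySem.List.sorted (PySem.Set.ofList xs) (fun v => v)
      ↔ y ∈ pvDD (PySem.List.sorted xs (fun v => v)) := by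
    intro y
    rw [PySem.List.mem_sorted, PySem.Set.mem_ofList, mem_pvDD, PySem.List.mem_sorted]
  have hperm : (PySem.List.sorted (PySem.Set.ofList xs) (fun v => v)).Perm
      (pvDD (PySem.List.sorted xs (fun v => v))) :=
    (List.perm_ext_iff_of_nodup (h1.imp (fun hab => ne_of_lt hab))
      (h2.imp (fun hab => ne_of_lt hab))).mpr hmem
  exact List.Perm.eq_of_pairwise
    (fun a b _ _ hab hba => le_antisymm hab hba)
    (h1.imp le_of_lt) (h2.imp le_of_lt) hperm

-- ----- A's indexed adjacent-gap fold is the pvPairs fold -----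

theorem pvGetD_append_left (l : List Int) (x : Int) (t : Int) (h0 : 0 ≤ t) (h1 : t < (l.length : Int)) :
    PySem.List.pyGetD (l ++ [x]) t 0 = PySem.List.pyGetD l t 0 := by
  rw [PySem.List.pyGetD_eq_getElem _ _ h0 (by simp; omega),
      PySem.List.pyGetD_eq_getElem _ _ h0 h1]
  rw [List.getElem_append_left (by omega)]

theorem pv_idx2pair (l : List Int) (o : Option Int) :
    (PySem.List.pyRange 1 (l.length : Int)).foldl (fun mv a =>
      some (match mv with
        | none => PySem.List.pyGetD l a 0 - PySem.List.pyGetD l (a - 1) 0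
        | some v => min v (PySem.List.pyGetD l a 0 - PySem.List.pyGetD l (a - 1) 0))) o
    = (pvPairs l).foldl (fun mv p => pvAStep mv (p.2 - p.1)) o := by
  induction l using List.reverseRecOn generalizing o with
  | nil => simp [pvPairs, PySem.List.pyRange_one_eq_nil]
  | append_singleton l x ih =>
    by_cases hne : l = []
    · subst hne; simp [pvPairs, PySem.List.pyRange_one_eq_nil]
    · rw [pvPairs_append l x hne]
      have hlpos0 : 0 < l.length := List.length_pos_iff.mpr hne
      have hlen : ((l ++ [x]).length : Int) = (l.length : Int) + 1 := by simp
      rw [hlen, PySem.List.pyRange_one_succ_right (by omega)]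
      rw [List.foldl_append, List.foldl_append]
      have hcong : (PySem.List.pyRange 1 (l.length : Int)).foldl (fun mv a =>
          some (match mv with
            | none => PySem.List.pyGetD (l ++ [x]) a 0 - PySem.List.pyGetD (l ++ [x]) (a - 1) 0
            | some v => min v (PySem.List.pyGetD (l ++ [x]) a 0 - PySem.List.pyGetD (l ++ [x]) (a - 1) 0))) o
          = (PySem.List.pyRange 1 (l.length : Int)).foldl (fun mv a =>
          some (match mv with
            | none => PySem.List.pyGetD l a 0 - PySem.List.pyGetD l (a - 1) 0
            | some v => min v (PySem.List.pyGetD l a 0 - PySem.List.pyGetD l (a - 1) 0))) o := by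
        apply PySem.List.foldl_congr_mem
        intro acc a ha
        have := PySem.List.mem_pyRange_one.mp ha
        rw [pvGetD_append_left l x a (by omega) (by omega),
            pvGetD_append_left l x (a - 1) (by omega) (by omega)]
      rw [hcong, ih]
      simp only [List.foldl_cons, List.foldl_nil]
      have hgetx : PySem.List.pyGetD (l ++ [x]) (l.length : Int) 0 = x := by
        rw [PySem.List.pyGetD_eq_getElem _ _ (by omega) (by simp)]
        simp
      have hgetlast : PySem.List.pyGetD (l ++ [x]) ((l.length : Int) - 1) 0 = l.getLast hne := by
        rw [PySem.List.pyGetD_eq_getElem _ _ (by omega)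
              (by simp only [List.length_append, List.length_cons, List.length_nil]; push_cast; omega)]
        rw [List.getElem_append_left (by omega)]
        rw [List.getLast_eq_getElem]
        congr 1
        omega
      rw [hgetx, hgetlast]
      cases acc : (pvPairs l).foldl (fun mv p => pvAStep mv (p.2 - p.1)) o with
      | none => simp [pvAStep]
      | some v => simp [pvAStep]

-- ----- pvMinO is a running minimum -----

theorem pvMinO_some (v : Int) (l : List Int) : pvMinO (some v) l = some (l.foldl min v) := by
  induction l generalizing v with
  | nil => rfl
  | cons d t ih => simpa [pvMinO, pvAStep] using ih (min v d)

theorem pvMinO_eq_min? (l : List Int) : pvMinO none l = l.min? := by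
  cases l with
  | nil => rfl
  | cons d t =>
    rw [List.min?_cons', ← pvMinO_some]
    rfl

theorem pvMinO_eq_of_dom (l1 l2 : List Int)
    (h12 : ∀ a ∈ l1, ∃ b ∈ l2, b ≤ a) (h21 : ∀ b ∈ l2, ∃ a ∈ l1, a ≤ b) :
    pvMinO none l1 = pvMinO none l2 := by
  rw [pvMinO_eq_min?, pvMinO_eq_min?]
  cases h1 : l1.min? with
  | none =>
    cases h2 : l2.min? with
    | none => rfl
    | some v2 =>
      obtain ⟨hv2, _⟩ := List.min?_eq_some_iff.mp h2
      obtain ⟨a, ha, _⟩ := h21 v2 hv2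
      rw [List.min?_eq_none_iff.mp h1] at ha
      simp at ha
  | some v1 =>
    obtain ⟨hv1, hmin1⟩ := List.min?_eq_some_iff.mp h1
    cases h2 : l2.min? with
    | none =>
      obtain ⟨b, hb, _⟩ := h12 v1 hv1
      rw [List.min?_eq_none_iff.mp h2] at hb
      simp at hb
    | some v2 =>
      obtain ⟨hv2, hmin2⟩ := List.min?_eq_some_iff.mp h2
      obtain ⟨b, hb, hbv1⟩ := h12 v1 hv1
      obtain ⟨a, ha, hav2⟩ := h21 v2 hv2
      have := hmin1 a ha
      have := hmin2 b hb
      congr 1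
      omega

-- ----- B's pairwise scan computes pvMinO over pvCands -----

theorem pvPairMin_inner (a : Int) (t : List Int) (o : Option Int) :
    t.foldl (fun best b =>
        let d := if a > b then a - b else b - a
        if d = 0 then best
        else match best with
          | none => some d
          | some v => if d < v then some d else best) o
      = pvMinO o ((t.filter (fun b => pvPosD a b != 0)).map (fun b => pvPosD a b)) := by
  induction t generalizing o with
  | nil => rfl
  | cons b t ih =>
    simp only [List.foldl_cons, List.filter_cons]
    by_cases hd : (if a > b then a - b else b - a) = 0
    · rw [if_pos hd, if_neg (by simp [pvPosD, hd])]
      exact ih o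
    · rw [if_neg hd]
      have hcond : (pvPosD a b != 0) = true := by
        simp only [pvPosD, bne_iff_ne, ne_eq]; exact hd
      rw [if_pos hcond]
      simp only [List.map_cons]
      rw [show pvMinO o (pvPosD a b :: (t.filter (fun b => pvPosD a b != 0)).map
            (fun b => pvPosD a b))
          = pvMinO (pvAStep o (pvPosD a b)) ((t.filter (fun b => pvPosD a b != 0)).map
            (fun b => pvPosD a b)) by simp [pvMinO]]
      rw [← ih (pvAStep o (pvPosD a b))]
      congr 1
      cases o with
      | none => simp [pvAStep, pvPosD]
      | some v =>
        simp only [pvAStep, pvPosD]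
        by_cases hlt : (if a > b then a - b else b - a) < v
        · rw [if_pos hlt, min_eq_right (by omega)]
        · rw [if_neg hlt, min_eq_left (by omega)]

theorem pvPairMin_eq (xs : List Int) (o : Option Int) :
    pvPairMin xs o = pvMinO o (pvCands xs) := by
  induction xs generalizing o with
  | nil => rfl
  | cons a t ih =>
    show pvPairMin t _ = _
    rw [pvPairMin_inner a t o, ih]
    simp [pvMinO, pvCands, List.foldl_append]

-- ----- the two candidate multisets dominate each other -----

theorem pvPosD_eq_zero_iff (a b : Int) : pvPosD a b = 0 ↔ a = b := by
  simp only [pvPosD]; split_ifs <;> omega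

theorem pvCands_sound (xs : List Int) (c : Int) (h : c ∈ pvCands xs) :
    ∃ x ∈ xs, ∃ y ∈ xs, x < y ∧ c = y - x := by
  induction xs with
  | nil => simp [pvCands] at h
  | cons a t ih =>
    rw [pvCands, List.mem_append] at h
    rcases h with h | h
    · obtain ⟨b, hb, rfl⟩ := List.mem_map.mp h
      obtain ⟨hbt, hbne⟩ := List.mem_filter.mp hb
      have hne : a ≠ b := by
        intro he; rw [(pvPosD_eq_zero_iff a b).mpr he] at hbne; simp at hbne
      by_cases hab : a > b
      · refine ⟨b, by simp [hbt], a, by simp, by omega, ?_⟩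
        simp [pvPosD, hab]
      · refine ⟨a, by simp, b, by simp [hbt], by omega, ?_⟩
        simp [pvPosD, hab]
    · obtain ⟨x, hx, y, hy, hxy, rfl⟩ := ih h
      exact ⟨x, by simp [hx], y, by simp [hy], hxy, rfl⟩

theorem pvCands_complete (xs : List Int) (x y : Int)
    (hx : x ∈ xs) (hy : y ∈ xs) (hxy : x < y) : (y - x) ∈ pvCands xs := by
  induction xs with
  | nil => simp at hx
  | cons a t ih =>
    rw [pvCands, List.mem_append]
    rcases List.mem_cons.mp hx with rfl | hxt
    · -- x = a, so y ∈ t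
      have hyt : y ∈ t := by
        rcases List.mem_cons.mp hy with rfl | h
        · omega
        · exact h
      left
      refine List.mem_map.mpr ⟨y, List.mem_filter.mpr ⟨hyt, ?_⟩, ?_⟩
      · simp [pvPosD]; omega
      · simp [pvPosD]; omega
    · rcases List.mem_cons.mp hy with rfl | hyt
      · -- y = a, x ∈ t
        left
        refine List.mem_map.mpr ⟨x, List.mem_filter.mpr ⟨hxt, ?_⟩, ?_⟩
        · simp [pvPosD]; omega
        · simp [pvPosD]; omega
      · exact Or.inr (ih hxt hyt)

theorem pvPairs_sound (l : List Int) (hp : l.Pairwise (· < ·)) :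
    ∀ p ∈ pvPairs l, p.1 ∈ l ∧ p.2 ∈ l ∧ p.1 < p.2 := by
  induction l with
  | nil => simp [pvPairs]
  | cons a t ih =>
    cases t with
    | nil => simp [pvPairs]
    | cons b t' =>
      intro p hp'
      rw [pvPairs_cons_cons, List.mem_cons] at hp'
      rcases hp' with rfl | hp'
      · exact ⟨by simp, by simp, (List.pairwise_cons.mp hp).1 b (by simp)⟩
      · obtain ⟨h1, h2, h3⟩ := ih (List.pairwise_cons.mp hp).2 p hp'
        exact ⟨by simp [h1], by simp [h2], h3⟩

theorem pvPairs_cover (l : List Int) (hp : l.Pairwise (· < ·)) (x y : Int)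
    (hx : x ∈ l) (hy : y ∈ l) (hxy : x < y) :
    ∃ p ∈ pvPairs l, p.2 - p.1 ≤ y - x := by
  induction l with
  | nil => simp at hx
  | cons a t ih =>
    have hpt := (List.pairwise_cons.mp hp).2
    have hlt := (List.pairwise_cons.mp hp).1
    have hyt : y ∈ t := by
      rcases List.mem_cons.mp hy with rfl | h
      · rcases List.mem_cons.mp hx with rfl | hxt
        · omega
        · have := hlt x hxt; omega
      · exact h
    obtain ⟨b, t', rfl⟩ := List.exists_cons_of_ne_nil (List.ne_nil_of_mem hyt)
    rcases List.mem_cons.mp hx with rfl | hxt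
    · refine ⟨(x, b), by rw [pvPairs_cons_cons]; simp, ?_⟩
      have hby : b ≤ y := by
        rcases List.mem_cons.mp hyt with rfl | h
        · omega
        · have := (List.pairwise_cons.mp hpt).1 y h; omega
      simp; omega
    · obtain ⟨p, hpmem, hple⟩ := ih hpt hxt hyt
      exact ⟨p, by rw [pvPairs_cons_cons]; simp [hpmem], hple⟩

-- ----- the per-window equivalence -----

theorem pv_window (cells : List Int) (hne : cells ≠ []) (curr : List Int) :
    (match (pvPairs (pvDD (PySem.List.sorted cells (fun v => v)))).foldl
        (fun mv p => pvAStep mv (p.2 - p.1)) none with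
      | some v => (if (pvDD (PySem.List.sorted cells (fun v => v))).length == 1
          then curr ++ [0] else curr) ++ [v]
      | none => (if (pvDD (PySem.List.sorted cells (fun v => v))).length == 1
          then curr ++ [0] else curr))
    = curr ++ [match pvPairMin cells none with | some v => v | none => 0] := by
  set S := PySem.List.sorted cells (fun v => v) with hS
  have hSper : S.Pairwise (· ≤ ·) := PySem.List.sorted_pairwise cells (fun v => v)
  have hD : (pvDD S).Pairwise (· < ·) := pvDD_pairwise_lt S hSper
  have hmemD : ∀ z, z ∈ pvDD S ↔ z ∈ cells := by
    intro z; rw [mem_pvDD, hS, PySem.List.mem_sorted]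
  have hfold : (pvPairs (pvDD S)).foldl (fun mv p => pvAStep mv (p.2 - p.1)) none
      = pvMinO none ((pvPairs (pvDD S)).map (fun p => p.2 - p.1)) := by
    rw [pvMinO, List.foldl_map]
  have hgaps : pvMinO none ((pvPairs (pvDD S)).map (fun p => p.2 - p.1))
      = pvMinO none (pvCands cells) := by
    apply pvMinO_eq_of_dom
    · intro g hg
      obtain ⟨p, hpmem, rfl⟩ := List.mem_map.mp hg
      obtain ⟨h1, h2, h3⟩ := pvPairs_sound _ hD p hpmem
      exact ⟨p.2 - p.1, pvCands_complete cells p.1 p.2 ((hmemD _).mp h1) ((hmemD _).mp h2) h3,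
        le_refl _⟩
    · intro c hc
      obtain ⟨x, hx, y, hy, hxy, rfl⟩ := pvCands_sound cells c hc
      obtain ⟨p, hpmem, hple⟩ := pvPairs_cover _ hD x y ((hmemD x).mpr hx) ((hmemD y).mpr hy) hxy
      exact ⟨p.2 - p.1, List.mem_map.mpr ⟨p, hpmem, rfl⟩, hple⟩
  rw [pvPairMin_eq, hfold, hgaps]
  cases hM : pvMinO none (pvCands cells) with
  | some v =>
    -- some gap exists, so pvDD S has at least two elements
    have hgne : ((pvPairs (pvDD S)).map (fun p => p.2 - p.1)) ≠ [] := by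
      intro h
      rw [hgaps] at hfold
      rw [← hgaps, h] at hM
      simp [pvMinO] at hM
    have hlen : ¬ (pvDD S).length = 1 := by
      intro h1
      apply hgne
      simp only [List.map_eq_nil_iff]
      rw [pvPairs_eq_nil_iff]; omega
    rw [if_neg (by simpa using hlen)]
  | none =>
    -- no candidate: pvDD S is a single element
    have hgnil : (pvPairs (pvDD S)).map (fun p => p.2 - p.1) = [] := by
      have := hgaps.trans hM
      rw [pvMinO_eq_min?] at this
      exact List.min?_eq_none_iff.mp this
    have hDne : pvDD S ≠ [] := by
      have hSne : S ≠ [] := by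
        rw [hS, Ne, PySem.List.sorted_eq_nil_iff]; exact hne
      obtain ⟨a, t, hat⟩ := List.exists_cons_of_ne_nil hSne
      obtain ⟨u, hu⟩ := pvDD_cons_head a t
      rw [hat, hu]; simp
    have hlen : (pvDD S).length = 1 := by
      rw [List.map_eq_nil_iff, pvPairs_eq_nil_iff] at hgnil
      have := List.length_pos_iff.mpr hDne
      omega
    rw [if_pos (by simpa using hlen)]

-- ----- geometry: the indexed seen-set is the set of the sliced cells -----

theorem pv_foldl_flatMap {α β γ : Type} (f : γ → β → γ) (g : α → List β) (l : List α) (init : γ) :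
    (l.flatMap g).foldl f init = l.foldl (fun acc x => (g x).foldl f acc) init := by
  induction l generalizing init with
  | nil => simp
  | cons x t ih => simp [List.foldl_append, ih]

theorem pv_range_map {α : Type} (xs : List α) (a b : Int) (d : α)
    (ha : 0 ≤ a) (hb0 : 0 ≤ b) (hb : b ≤ (xs.length : Int)) :
    (PySem.List.pyRange a b).map (fun t => PySem.List.pyGetD xs t d)
      = PySem.List.slice xs (some a) (some b) := by
  by_cases hab : b ≤ a
  · rw [PySem.List.pyRange_one_eq_nil hab]
    have : (PySem.List.slice xs (some a) (some b)).length = 0 := by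
      rw [PySem.List.length_slice]
      simp only [PySem.List.clampIdx]
      split_ifs <;> omega
    simp [List.length_eq_zero_iff.mp this]
  · rw [not_le] at hab
    rw [PySem.List.slice_of_nonneg xs ha hb0 (by omega) hb]
    apply List.ext_getElem
    · simp [PySem.List.length_pyRange_one]
      omega
    · intro t h1 h2
      simp only [List.getElem_map, PySem.List.getElem_pyRange_one]
      simp only [List.length_map, PySem.List.length_pyRange_one] at h1
      rw [PySem.List.pyGetD_eq_getElem _ _ (by omega) (by omega)]
      rw [List.getElem_take, List.getElem_drop]
      congr 1
      omega

theorem pv_seen (grid : List (List Int)) (i j k : Int)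
    (hi : 0 ≤ i) (hik : i + k ≤ (grid.length : Int)) (hj : 0 ≤ j) (hk : 1 ≤ k)
    (hrow : ∀ r ∈ grid, j + k ≤ (r.length : Int)) :
    (PySem.List.pyRange i (i + k)).foldl (fun s x =>
        (PySem.List.pyRange j (j + k)).foldl (fun s y =>
          PySem.Set.add s (PySem.List.pyGetD (PySem.List.pyGetD grid x []) y 0)) s)
      PySem.Set.empty
    = PySem.Set.ofList ((PySem.List.slice grid (some i) (some (i + k))).flatMap
        (fun r => PySem.List.slice r (some j) (some (j + k)))) := by
  rw [PySem.Set.ofList_eq_foldl, pv_foldl_flatMap]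
  rw [← pv_range_map grid i (i + k) [] hi (by omega) hik, List.foldl_map]
  apply PySem.List.foldl_congr_mem
  intro s x hx
  have hxr := PySem.List.mem_pyRange_one.mp hx
  have hmem : PySem.List.pyGetD grid x [] ∈ grid :=
    PySem.List.pyGetD_mem grid [] (by constructor <;> omega)
  rw [← pv_range_map (PySem.List.pyGetD grid x []) j (j + k) 0 hj (by omega) (hrow _ hmem),
      List.foldl_map]

theorem pv_cells_ne (grid : List (List Int)) (i j k : Int)
    (hi : 0 ≤ i) (hik : i + k ≤ (grid.length : Int)) (hj : 0 ≤ j) (hk : 1 ≤ k)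
    (hrow : ∀ r ∈ grid, j + k ≤ (r.length : Int)) :
    (PySem.List.slice grid (some i) (some (i + k))).flatMap
        (fun r => PySem.List.slice r (some j) (some (j + k))) ≠ [] := by
  have hsl : (PySem.List.slice grid (some i) (some (i + k))).length ≠ 0 := by
    rw [PySem.List.slice_of_nonneg grid hi (by omega) (by omega) hik]
    simp only [List.length_take, List.length_drop]
    omega
  obtain ⟨r0, hr0⟩ := List.exists_mem_of_length_pos (Nat.pos_of_ne_zero hsl)
  have hr0g : r0 ∈ grid := PySem.List.mem_of_mem_slice _ _ _ hr0
  have hjk : j + k ≤ (r0.length : Int) := hrow r0 hr0g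
  have hrl : (PySem.List.slice r0 (some j) (some (j + k))).length ≠ 0 := by
    rw [PySem.List.slice_of_nonneg r0 hj (by omega) (by omega) (by omega)]
    simp only [List.length_take, List.length_drop]
    omega
  obtain ⟨v, hv⟩ := List.exists_mem_of_length_pos (Nat.pos_of_ne_zero hrl)
  exact List.ne_nil_of_mem (List.mem_flatMap.mpr ⟨r0, hr0, hv⟩)

-- ===== VERDICT (by name: the statement is the Claim_ definition above) =====
theorem minAbsDiff_spec : Claim_equal_minAbsDiff := by
  intro grid k _hdom hpre
  unfold Spec_minAbsDiff
  obtain ⟨hgne, hrect⟩ := hpre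
  by_cases hk : k < 1
  · -- k < 1: every inner range is empty, A collects nothing; B returns [] at once
    simp only [minAbsDiff, minAbsDiff_alt]
    rw [if_pos hk]
    apply List.foldl_fixed'
    intro i
    have hinner : (PySem.List.pyRange 0 ((grid.headI.length : Int) - k + 1)).foldl
        (fun (curr : List Int) (j : Int) =>
          let seen : PySem.Set Int :=
            (PySem.List.pyRange i (i + k)).foldl (fun s x =>
              (PySem.List.pyRange j (j + k)).foldl (fun s y =>
                PySem.Set.add s (PySem.List.pyGetD (PySem.List.pyGetD grid x []) y 0)) s)
              PySem.Set.empty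
          let arr := PySem.List.sorted seen (fun v => v)
          let curr' := if arr.length == 1 then curr ++ [0] else curr
          let minVal : Option Int :=
            (PySem.List.pyRange 1 (arr.length : Int)).foldl (fun mv a =>
              some (match mv with
                | none => PySem.List.pyGetD arr a 0 - PySem.List.pyGetD arr (a - 1) 0
                | some v => min v (PySem.List.pyGetD arr a 0 - PySem.List.pyGetD arr (a - 1) 0))) none
          match minVal with
          | some v => curr' ++ [v]
          | none => curr') ([] : List Int) = [] := by
      apply List.foldl_fixed'
      intro j
      rw [PySem.List.pyRange_one_eq_nil (by omega : i + k ≤ i)]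
      rfl
    simp only [hinner]
    rfl
  · -- k ≥ 1: both programs slide over the same windows
    push Not at hk
    simp only [minAbsDiff, minAbsDiff_alt]
    rw [if_neg (by omega : ¬ k < 1)]
    apply PySem.List.foldl_congr_mem
    intro ans i hi
    have hi' := PySem.List.mem_pyRange_one.mp hi
    have hkn : k ≤ (grid.length : Int) := by omega
    have hfold : (PySem.List.pyRange 0 ((grid.headI.length : Int) - k + 1)).foldl
        (fun (curr : List Int) (j : Int) =>
          let seen : PySem.Set Int :=
            (PySem.List.pyRange i (i + k)).foldl (fun s x =>
              (PySem.List.pyRange j (j + k)).foldl (fun s y =>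
                PySem.Set.add s (PySem.List.pyGetD (PySem.List.pyGetD grid x []) y 0)) s)
              PySem.Set.empty
          let arr := PySem.List.sorted seen (fun v => v)
          let curr' := if arr.length == 1 then curr ++ [0] else curr
          let minVal : Option Int :=
            (PySem.List.pyRange 1 (arr.length : Int)).foldl (fun mv a =>
              some (match mv with
                | none => PySem.List.pyGetD arr a 0 - PySem.List.pyGetD arr (a - 1) 0
                | some v => min v (PySem.List.pyGetD arr a 0 - PySem.List.pyGetD arr (a - 1) 0))) none
          match minVal with
          | some v => curr' ++ [v]
          | none => curr') ([] : List Int)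
      = (PySem.List.pyRange 0 ((grid.headI.length : Int) - k + 1)).foldl
        (fun (row : List Int) (j : Int) =>
          let cells := (PySem.List.slice grid (some i) (some (i + k))).flatMap
              (fun r => PySem.List.slice r (some j) (some (j + k)))
          let best := pvPairMin cells none
          row ++ [match best with | some v => v | none => 0]) ([] : List Int) := by
      apply PySem.List.foldl_congr_mem
      intro acc j hj
      have hj' := PySem.List.mem_pyRange_one.mp hj
      have hkm : k ≤ (grid.headI.length : Int) := by omega
      have hrow : ∀ r ∈ grid, j + k ≤ (r.length : Int) := by
        intro r hr
        have := hrect ⟨hk, hkn, hkm⟩ r hr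
        omega
      simp only [pv_seen grid i j k (by omega) (by omega) (by omega) hk hrow]
      rw [pv_arr_eq]
      rw [pv_idx2pair]
      exact pv_window _ (pv_cells_ne grid i j k (by omega) (by omega) (by omega) hk hrow) acc
    simp only [hfold]
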